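-- pv_equiv track=rewrite | github.com/cfi2017/advent-of-code | 2020/day_4/main.py | parse
-- ===== SOURCE A (Python) =====
-- def parse(passport):
--     elements = passport.split(' ')
--     elements = map(lambda x: x.split('\n'), elements)
--     sublist = []
--     for list in elements:
--         for element in list:
--             sublist.append(element)
--     return sublist
-- ===== SOURCE B (Python) =====
-- def parse(passport):
--     return passport.replace(' ', '\n').split('\n')
-- ===== Notes on version B (the rewrite author's own statement) =====
-- stated objective: simpler
-- what changed: Replaces the split-on-space, per-piece split-on-newline and nested accumulation loop by one normalization pass (every space becomes a newline) followed by a single flat split on newlines.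
import Mathlib
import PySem

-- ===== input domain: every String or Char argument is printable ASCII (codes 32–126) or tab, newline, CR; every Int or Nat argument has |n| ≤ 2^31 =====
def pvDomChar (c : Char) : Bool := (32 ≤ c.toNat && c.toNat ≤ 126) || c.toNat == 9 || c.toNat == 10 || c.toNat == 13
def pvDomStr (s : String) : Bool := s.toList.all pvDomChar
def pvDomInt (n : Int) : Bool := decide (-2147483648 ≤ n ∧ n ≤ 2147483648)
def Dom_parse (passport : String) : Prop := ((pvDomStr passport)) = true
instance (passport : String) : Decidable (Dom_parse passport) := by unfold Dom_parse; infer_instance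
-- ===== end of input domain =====

-- B replaces A's split-on-space / per-piece split-on-newline / nested flattening loop
-- by one normalization (replace ' ' with '\n') followed by a single flat split: simpler.

-- ===== PORT A =====
-- passport.split(' '); map split('\n'); nested loop appending each element.
def parse (passport : String) : List String :=
  let elements := PySem.Chars.splitOn passport.toList " ".toList
  let elements2 := elements.map (fun x => PySem.Chars.splitOn x "\n".toList)
  let sublist := elements2.foldl (fun sub lst => lst.foldl (fun s e => s ++ [e]) sub)
      ([] : List (List Char))
  sublist.map String.ofList

-- ===== PORT B =====
-- passport.replace(' ', '\n').split('\n')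
def parse_alt (passport : String) : List String :=
  (PySem.Chars.splitOn (PySem.Str.replace passport " " "\n").toList "\n".toList).map String.ofList

-- ===== PRECONDITION & SPEC =====
def Spec_parse (passport : String) (out : List String) : Prop := out = parse_alt passport
instance (passport : String) (out : List String) : Decidable (Spec_parse passport out) := by unfold Spec_parse; infer_instance

-- ===== CLAIM (what is proved, stated in full; the proofs are below) =====
def Claim_equal_parse : Prop := ∀ (passport : String), Dom_parse passport → Spec_parse passport (parse passport)

-- ===== LEMMAS AND PROOFS =====

-- split on a single-character separator, without fuel or accumulators
def sgo (c : Char) (cur : List Char) : List Char → List (List Char)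
  | [] => [cur.reverse]
  | x :: t => if x = c then cur.reverse :: sgo c [] t else sgo c (x :: cur) t

lemma splitOn_go_single (c : Char) (l : List Char) : ∀ (fuel : Nat) (cur : List Char) (acc : List (List Char)),
    l.length ≤ fuel →
    PySem.Chars.splitOn.go [c] fuel l cur acc = acc.reverse ++ sgo c cur l := by
  induction l with
  | nil =>
    intro fuel cur acc h
    cases fuel <;> simp [PySem.Chars.splitOn.go, sgo]
  | cons x t ih =>
    intro fuel cur acc h
    cases fuel with
    | zero => simp at h
    | succ f =>
      simp only [PySem.Chars.splitOn.go]
      by_cases hx : c = x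
      · subst hx
        simp only [List.isPrefixOf, Bool.and_true, beq_self_eq_true, if_pos]
        rw [show List.drop [c].length (c :: t) = t by simp]
        rw [ih f [] (cur.reverse :: acc) (by simpa using h)]
        simp [sgo]
      · have : [c].isPrefixOf (x :: t) = false := by
          simp [List.isPrefixOf]; exact hx
        rw [this]
        simp only [Bool.false_eq_true, if_false]
        rw [ih f (x :: cur) acc (by simpa using Nat.le_of_succ_le_succ h)]
        simp only [sgo]
        rw [if_neg (fun h' => hx h'.symm)]

lemma replace_go_single (a b : Char) (l : List Char) : ∀ (fuel : Nat) (acc : List Char),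
    l.length ≤ fuel →
    PySem.Chars.replace.go [a] [b] fuel l acc
      = acc.reverse ++ l.map (fun x => if x = a then b else x) := by
  induction l with
  | nil => intro fuel acc h; cases fuel <;> simp [PySem.Chars.replace.go]
  | cons x t ih =>
    intro fuel acc h
    cases fuel with
    | zero => simp at h
    | succ f =>
      simp only [PySem.Chars.replace.go]
      by_cases hx : a = x
      · subst hx
        simp only [List.isPrefixOf, Bool.and_true, beq_self_eq_true, if_pos]
        rw [show List.drop [a].length (a :: t) = t by simp]
        rw [ih f ([b].reverse ++ acc) (by simpa using h)]
        simp
      · have hpre : [a].isPrefixOf (x :: t) = false := by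
          simp [List.isPrefixOf]
          exact hx
        rw [hpre]
        simp only [Bool.false_eq_true, if_false]
        rw [ih f (x :: acc) (by simpa using Nat.le_of_succ_le_succ h)]
        simp only [List.map_cons]
        rw [if_neg (fun h' => hx h'.symm)]
        simp

lemma splitOn_single (c : Char) (l : List Char) :
    PySem.Chars.splitOn l [c] = sgo c [] l := by
  simpa using splitOn_go_single c l (l.length + 1) [] [] (by omega)

lemma replace_single (a b : Char) (l : List Char) :
    PySem.Chars.replace l [a] [b] = l.map (fun x => if x = a then b else x) := by
  simp only [PySem.Chars.replace, List.isEmpty_cons, Bool.false_eq_true, if_false]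
  simpa using replace_go_single a b l l.length [] le_rfl

lemma sgo_ne_nil (c : Char) (cur l : List Char) : sgo c cur l ≠ [] := by
  induction l generalizing cur with
  | nil => simp [sgo]
  | cons x t ih => by_cases hx : x = c <;> simp [sgo, hx, ih]

lemma sgo_cur (c : Char) (cur l : List Char) :
    sgo c cur l = (cur.reverse ++ (sgo c [] l).headI) :: (sgo c [] l).tail := by
  induction l generalizing cur with
  | nil => simp [sgo]
  | cons x t ih =>
    by_cases hx : x = c
    · simp [sgo, hx]
    · simp only [sgo, if_neg hx]
      rw [ih (x :: cur), ih [x]]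
      simp

lemma sgo_main (l : List Char) :
    sgo '\n' [] (l.map (fun x => if x = ' ' then '\n' else x))
      = (sgo ' ' [] l).flatMap (sgo '\n' []) := by
  induction l with
  | nil => simp [sgo]
  | cons x t ih =>
    by_cases hs : x = ' '
    · subst hs
      simp only [List.map_cons]
      simp only [sgo, ih]
      rfl
    · by_cases hn : x = '\n'
      · subst hn
        simp only [List.map_cons, if_neg hs]
        simp only [sgo, if_neg hs]
        rw [sgo_cur ' ' ['\n'] t]
        simp only [List.flatMap_cons]
        obtain ⟨h0, t0, h0t0⟩ : ∃ h0 t0, sgo ' ' [] t = h0 :: t0 := by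
          rcases e : sgo ' ' [] t with _ | ⟨h0, t0⟩
          · exact absurd e (sgo_ne_nil _ _ _)
          · exact ⟨h0, t0, rfl⟩
        rw [h0t0] at ih ⊢
        simp only [List.headI, List.tail, List.reverse_cons, List.reverse_nil, List.nil_append,
          List.singleton_append]
        simp only [sgo]
        rw [ih]
        simp
      · simp only [List.map_cons, if_neg hs]
        simp only [sgo, if_neg hn, if_neg hs]
        rw [sgo_cur '\n' [x], sgo_cur ' ' [x]]
        obtain ⟨h0, t0, h0t0⟩ : ∃ h0 t0, sgo ' ' [] t = h0 :: t0 := by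
          rcases e : sgo ' ' [] t with _ | ⟨h0, t0⟩
          · exact absurd e (sgo_ne_nil _ _ _)
          · exact ⟨h0, t0, rfl⟩
        obtain ⟨g0, g1, hg⟩ : ∃ g0 g1, sgo '\n' [] h0 = g0 :: g1 := by
          rcases e : sgo '\n' [] h0 with _ | ⟨g0, g1⟩
          · exact absurd e (sgo_ne_nil _ _ _)
          · exact ⟨g0, g1, rfl⟩
        rw [h0t0] at ih ⊢
        simp only [List.flatMap_cons, hg, List.cons_append] at ih
        simp only [List.reverse_cons, List.reverse_nil, List.nil_append, List.singleton_append,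
          List.headI, List.tail, ih]
        have gx : sgo '\n' [] (x :: h0) = (x :: g0) :: g1 := by
          simp only [sgo, if_neg hn]
          rw [sgo_cur '\n' [x] h0, hg]
          simp
        simp [gx]

lemma foldl_nested_append (L : List (List (List Char))) (acc : List (List Char)) :
    L.foldl (fun sub lst => lst.foldl (fun s e => s ++ [e]) sub) acc = acc ++ L.flatten := by
  induction L generalizing acc with
  | nil => simp
  | cons h t ih =>
    rw [List.foldl_cons, ih, PySem.List.foldl_append_singleton]
    simp

-- ===== VERDICT (by name: the statement is the Claim_ definition above) =====
theorem parse_spec : Claim_equal_parse := by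
  intro passport _
  unfold Spec_parse parse parse_alt
  have hsp : (" " : String).toList = [' '] := rfl
  have hnl : ("\n" : String).toList = ['\n'] := rfl
  rw [hsp, hnl, PySem.Str.toList_replace, hsp, hnl]
  rw [replace_single, splitOn_single, splitOn_single, sgo_main]
  simp only [foldl_nested_append, List.nil_append, List.flatMap_def]
  congr 1
  induction sgo ' ' [] passport.toList with
  | nil => rfl
  | cons h t ih => simp [splitOn_single]
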